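-- pv_equiv track=rewrite | github.com/SabatierBoris/adventofcode | 2019/08/common.py | merge_layers
-- ===== SOURCE A (Python) =====
-- def merge_layers(layers):
--     tmp_layers = list(layers)
--     layer = ["0"] * len(tmp_layers[0])
--     tmp_layers.reverse()
--     for current in tmp_layers:
--         for i in range(len(layer)):
--             layer[i] = current[i] if current[i] != "2" else layer[i]
--     return "".join(layer)
-- ===== SOURCE B (Python) =====
-- def merge_layers(layers):
--     layers = list(layers)
--     width = len(layers[0])
--     out = []
--     for i in range(width):
--         pixel = "0"
--         for layer in layers:
--             if layer[i] != "2":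
--                 pixel = layer[i]
--                 break
--         out.append(pixel)
--     return "".join(out)
-- ===== Notes on version B (the rewrite author's own statement) =====
-- stated objective: idiomatic
-- what changed: B transposes the loops: instead of reversing the layer list and repeatedly overwriting a mutable layer buffer bottom-up over every layer, it computes each pixel independently by scanning the layers top-down and breaking at the first non-transparent character (default '0'), so it stops early per pixel.
import Mathlib
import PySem

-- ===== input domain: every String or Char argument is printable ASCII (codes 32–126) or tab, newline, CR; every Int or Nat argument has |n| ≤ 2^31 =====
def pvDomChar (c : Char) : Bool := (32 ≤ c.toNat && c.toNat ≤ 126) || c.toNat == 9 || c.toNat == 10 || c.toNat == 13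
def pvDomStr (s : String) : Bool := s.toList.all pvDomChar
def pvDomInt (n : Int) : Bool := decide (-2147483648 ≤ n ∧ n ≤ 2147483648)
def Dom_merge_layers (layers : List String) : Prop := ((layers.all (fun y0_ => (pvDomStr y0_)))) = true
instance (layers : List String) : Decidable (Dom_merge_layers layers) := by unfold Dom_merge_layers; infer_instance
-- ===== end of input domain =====

-- B replaces A's reversed bottom-up overwrite of a layer buffer by a per-pixel top-down
-- first-non-transparent scan (idiomatic decomposition; same cost). Return-value equivalence only.
-- ===== PORT A =====
-- one bottom-up overwrite pass of A's inner loop: layer[i] = current[i] if current[i] != "2" else layer[i]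
def mlStep (layer : List Char) (current : List Char) : List Char :=
  -- current.getD i '?' is in range (hence never the '?' default) under Pre_;
  -- out of range Python raises IndexError, which Pre_ excludes
  (List.range layer.length).foldl
    (fun acc i => acc.set i (if current.getD i '?' ≠ '2' then current.getD i '?' else acc.getD i '?'))
    layer

def merge_layers (layers : List String) : String :=
  match layers with
  | [] => ""   -- Python raises IndexError on []; excluded by Pre_
  | l0 :: _ =>
    String.ofList ((layers.map String.toList).reverse.foldl mlStep (List.replicate l0.length '0'))

-- ===== PORT B =====
-- top-down scan for the first non-transparent pixel at column i, default '0'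
def mlFirst (layers : List (List Char)) (i : Nat) : Char :=
  match layers with
  | [] => '0'
  | l :: rest =>
    let c := l.getD i '?'   -- in range under Pre_; Python raises IndexError out of range
    if c ≠ '2' then c else mlFirst rest i

def merge_layers_alt (layers : List String) : String :=
  match layers with
  | [] => ""   -- Python raises IndexError on []; excluded by Pre_
  | l0 :: _ =>
    String.ofList ((List.range l0.length).map (mlFirst (layers.map String.toList)))

-- ===== PRECONDITION & SPEC =====
-- Pre_ excludes exactly the inputs where Python A raises IndexError: the empty list and
-- ragged inputs where some layer is shorter than the first layer.
def Pre_merge_layers (layers : List String) : Prop :=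
  layers ≠ [] ∧ ∀ l ∈ layers, (layers.headD "").length ≤ l.length
instance (layers : List String) : Decidable (Pre_merge_layers layers) := by unfold Pre_merge_layers; infer_instance
def pvWitness_merge_layers : List String := ["210", "122", "001"]
def Spec_merge_layers (layers : List String) (out : String) : Prop := out = merge_layers_alt layers
instance (layers : List String) (out : String) : Decidable (Spec_merge_layers layers out) := by unfold Spec_merge_layers; infer_instance

-- ===== CLAIM (what is proved, stated in full; the proofs are below) =====
def Claim_equal_merge_layers : Prop := ∀ (layers : List String), Dom_merge_layers layers → Pre_merge_layers layers → Spec_merge_layers layers (merge_layers layers)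

-- ===== LEMMAS AND PROOFS =====

-- the per-pixel update A applies when merging one layer on top of the buffer value
def mlG (current : List Char) (j : Nat) (v : Char) : Char :=
  if current.getD j '?' ≠ '2' then current.getD j '?' else v

lemma foldl_set_length (idxs : List Nat) (layer : List Char) (f : Nat → List Char → Char) :
    (idxs.foldl (fun acc i => acc.set i (f i acc)) layer).length = layer.length := by
  induction idxs generalizing layer with
  | nil => rfl
  | cons i rest ih => simp [List.foldl_cons, ih, List.length_set]

lemma foldl_set_spec (g : Nat → Char → Char) (n : Nat) (layer : List Char) (i : Nat) :
    ((List.range n).foldl (fun acc j => acc.set j (g j (acc.getD j '?'))) layer)[i]? =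
      if i < n then (layer[i]?).map (g i) else layer[i]? := by
  induction n generalizing i with
  | zero => simp
  | succ n ih =>
    rw [List.range_succ, List.foldl_append]
    simp only [List.foldl_cons, List.foldl_nil]
    have hlen : (((List.range n).foldl (fun acc j => acc.set j (g j (acc.getD j '?'))) layer)).length
        = layer.length := foldl_set_length _ _ _
    rw [List.getElem?_set]
    by_cases hin : i = n
    · subst hin
      have hR : ((List.range i).foldl (fun acc j => acc.set j (g j (acc.getD j '?'))) layer)[i]?
          = layer[i]? := by rw [ih]; simp
      by_cases hl : i < layer.length
      · rw [if_pos rfl, if_pos (by omega), if_pos (by omega)]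
        rw [List.getD_eq_getElem?_getD, hR, List.getElem?_eq_getElem hl]
        simp
      · rw [if_pos rfl, if_neg (by omega), if_pos (by omega)]
        rw [List.getElem?_eq_none (by omega)]
        simp
    · rw [if_neg (fun h => hin h.symm), ih]
      by_cases hin2 : i < n
      · rw [if_pos hin2, if_pos (by omega)]
      · rw [if_neg hin2, if_neg (by omega)]

lemma mlStep_eq (layer current : List Char) :
    mlStep layer current =
      (List.range layer.length).foldl
        (fun acc j => acc.set j (mlG current j (acc.getD j '?'))) layer := rfl

lemma mlStep_length (layer current : List Char) :
    (mlStep layer current).length = layer.length := by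
  rw [mlStep_eq]
  exact foldl_set_length _ _ _

lemma mlStep_getElem? (layer current : List Char) (i : Nat) (hi : i < layer.length) :
    (mlStep layer current)[i]? = (layer[i]?).map (mlG current i) := by
  rw [mlStep_eq, foldl_set_spec, if_pos hi]

lemma merge_foldr_length (ls : List (List Char)) (w : Nat) :
    (ls.foldr (fun x y => mlStep y x) (List.replicate w '0')).length = w := by
  induction ls with
  | nil => simp
  | cons l rest ih => simpa [List.foldr_cons, mlStep_length] using ih

lemma merge_foldr_getElem? (ls : List (List Char)) (w : Nat) (i : Nat) (hi : i < w) :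
    (ls.foldr (fun x y => mlStep y x) (List.replicate w '0'))[i]? = some (mlFirst ls i) := by
  induction ls with
  | nil => simp [mlFirst, hi]
  | cons l rest ih =>
    rw [List.foldr_cons, mlStep_getElem? _ _ _ (by rw [merge_foldr_length]; exact hi), ih]
    simp [mlFirst, mlG]

-- ===== VERDICT (by name: the statement is the Claim_ definition above) =====
theorem merge_layers_spec : Claim_equal_merge_layers := by
  intro layers _ _
  unfold Spec_merge_layers
  match layers with
  | [] => rfl
  | l0 :: rest =>
    simp only [merge_layers, merge_layers_alt]
    rw [List.foldl_reverse]
    congr 1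
    apply List.ext_getElem?
    intro i
    by_cases hi : i < l0.length
    · rw [merge_foldr_getElem? _ _ _ (by simpa using hi)]
      simp [hi]
    · rw [List.getElem?_eq_none (by rw [merge_foldr_length]; omega),
          List.getElem?_eq_none (by rw [List.length_map, List.length_range]; omega)]
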